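-- pv_equiv track=rewrite | github.com/ashit06/FlowBit | flowbit-analytics-assignment/services/vanna/main_backup.py | generate_sql_with_fallback
-- ===== SOURCE A (Python) =====
-- def generate_sql_with_fallback(question: str) -> str:
--     """Generate SQL using pattern matching as fallback"""
--     question_lower = question.lower()
--
--     # Common query patterns
--     if any(word in question_lower for word in ['total revenue', 'revenue', 'total amount', 'total sales', 'sales total', 'total spend', 'spend total']):
--         return "SELECT SUM(\"totalAmount\") as total_revenue FROM invoices;"
--     elif any(word in question_lower for word in ['count invoices', 'number of invoices', 'how many invoices']):
--         return "SELECT COUNT(*) as invoice_count FROM invoices;"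
--     elif any(word in question_lower for word in ['vendors', 'suppliers', 'top vendors']):
--         return "SELECT name, COUNT(i.id) as invoice_count, SUM(i.\"totalAmount\") as total_amount FROM vendors v LEFT JOIN invoices i ON v.id = i.\"vendorId\" GROUP BY v.id, v.name ORDER BY total_amount DESC LIMIT 10;"
--     elif any(word in question_lower for word in ['customers', 'top customers']):
--         return "SELECT name, COUNT(i.id) as invoice_count, SUM(i.\"totalAmount\") as total_amount FROM customers c LEFT JOIN invoices i ON c.id = i.\"customerId\" GROUP BY c.id, c.name ORDER BY total_amount DESC LIMIT 10;"
--     elif any(word in question_lower for word in ['paid invoices', 'paid']):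
--         return "SELECT COUNT(*) as paid_count, SUM(\"totalAmount\") as paid_amount FROM invoices WHERE status = 'PAID';"
--     elif any(word in question_lower for word in ['pending invoices', 'pending']):
--         return "SELECT COUNT(*) as pending_count, SUM(\"totalAmount\") as pending_amount FROM invoices WHERE status = 'PENDING';"
--     elif any(word in question_lower for word in ['overdue invoices', 'overdue']):
--         return "SELECT COUNT(*) as overdue_count, SUM(\"totalAmount\") as overdue_amount FROM invoices WHERE status = 'OVERDUE';"
--     elif any(word in question_lower for word in ['jan', 'january', 'month']):
--         return "SELECT EXTRACT(MONTH FROM \"issueDate\") as month, COUNT(*) as invoice_count, SUM(\"totalAmount\") as total_amount FROM invoices WHERE EXTRACT(MONTH FROM \"issueDate\") = 1 GROUP BY EXTRACT(MONTH FROM \"issueDate\");"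
--     elif any(word in question_lower for word in ['sales by month', 'monthly sales', 'revenue by month']):
--         return "SELECT EXTRACT(MONTH FROM \"issueDate\") as month, COUNT(*) as invoice_count, SUM(\"totalAmount\") as total_amount FROM invoices GROUP BY EXTRACT(MONTH FROM \"issueDate\") ORDER BY month;"
--     elif 'average' in question_lower and ('invoice' in question_lower or 'amount' in question_lower):
--         return "SELECT AVG(\"totalAmount\") as average_invoice_value FROM invoices;"
--     elif any(word in question_lower for word in ['highest invoice', 'largest invoice', 'biggest invoice']):
--         return "SELECT v.name as vendor, \"invoiceNumber\", \"totalAmount\" FROM invoices i JOIN vendors v ON i.\"vendorId\" = v.id ORDER BY \"totalAmount\" DESC LIMIT 1;"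
--     elif 'last' in question_lower and ('days' in question_lower or 'week' in question_lower or 'month' in question_lower):
--         return "SELECT COUNT(*) as recent_invoices, SUM(\"totalAmount\") as recent_total FROM invoices WHERE \"issueDate\" >= CURRENT_DATE - INTERVAL '30 days';"
--     else:
--         return "SELECT 'Sorry, I cannot understand this question. Try asking about total revenue, invoices, vendors, customers, monthly sales, or average invoice value.' as message;"
-- ===== SOURCE B (Python) =====
-- # B: two-stage algorithm. Stage 1 makes ONE left-to-right scan of the lowered
-- # question, recording in a set every keyword phrase that occurs anywhere in it.
-- # Stage 2 never touches the text again: it evaluates each rule as pure set logic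
-- # over the found-set and returns the SQL of the lowest-numbered rule that fires.
--
-- _DEFAULT = "SELECT 'Sorry, I cannot understand this question. Try asking about total revenue, invoices, vendors, customers, monthly sales, or average invoice value.' as message;"
--
-- _SQL = [
--     "SELECT SUM(\"totalAmount\") as total_revenue FROM invoices;",
--     "SELECT COUNT(*) as invoice_count FROM invoices;",
--     "SELECT name, COUNT(i.id) as invoice_count, SUM(i.\"totalAmount\") as total_amount FROM vendors v LEFT JOIN invoices i ON v.id = i.\"vendorId\" GROUP BY v.id, v.name ORDER BY total_amount DESC LIMIT 10;",
--     "SELECT name, COUNT(i.id) as invoice_count, SUM(i.\"totalAmount\") as total_amount FROM customers c LEFT JOIN invoices i ON c.id = i.\"customerId\" GROUP BY c.id, c.name ORDER BY total_amount DESC LIMIT 10;",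
--     "SELECT COUNT(*) as paid_count, SUM(\"totalAmount\") as paid_amount FROM invoices WHERE status = 'PAID';",
--     "SELECT COUNT(*) as pending_count, SUM(\"totalAmount\") as pending_amount FROM invoices WHERE status = 'PENDING';",
--     "SELECT COUNT(*) as overdue_count, SUM(\"totalAmount\") as overdue_amount FROM invoices WHERE status = 'OVERDUE';",
--     "SELECT EXTRACT(MONTH FROM \"issueDate\") as month, COUNT(*) as invoice_count, SUM(\"totalAmount\") as total_amount FROM invoices WHERE EXTRACT(MONTH FROM \"issueDate\") = 1 GROUP BY EXTRACT(MONTH FROM \"issueDate\");",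
--     "SELECT EXTRACT(MONTH FROM \"issueDate\") as month, COUNT(*) as invoice_count, SUM(\"totalAmount\") as total_amount FROM invoices GROUP BY EXTRACT(MONTH FROM \"issueDate\") ORDER BY month;",
--     "SELECT AVG(\"totalAmount\") as average_invoice_value FROM invoices;",
--     "SELECT v.name as vendor, \"invoiceNumber\", \"totalAmount\" FROM invoices i JOIN vendors v ON i.\"vendorId\" = v.id ORDER BY \"totalAmount\" DESC LIMIT 1;",
--     "SELECT COUNT(*) as recent_invoices, SUM(\"totalAmount\") as recent_total FROM invoices WHERE \"issueDate\" >= CURRENT_DATE - INTERVAL '30 days';",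
-- ]
--
-- # keyword lists for the simple (any-of) rules; [] at the compound slots 9 and 11
-- _RULE_KEYS = [
--     ['total revenue', 'revenue', 'total amount', 'total sales', 'sales total', 'total spend', 'spend total'],
--     ['count invoices', 'number of invoices', 'how many invoices'],
--     ['vendors', 'suppliers', 'top vendors'],
--     ['customers', 'top customers'],
--     ['paid invoices', 'paid'],
--     ['pending invoices', 'pending'],
--     ['overdue invoices', 'overdue'],
--     ['jan', 'january', 'month'],
--     ['sales by month', 'monthly sales', 'revenue by month'],
--     [],
--     ['highest invoice', 'largest invoice', 'biggest invoice'],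
--     [],
-- ]
--
-- # every phrase stage 1 looks for (rule keywords plus the words of the compound rules)
-- _PHRASES = sorted({p for ks in _RULE_KEYS for p in ks}
--                   | {'average', 'invoice', 'amount', 'last', 'days', 'week'})
--
--
-- def _fires(r, found):
--     if r == 9:
--         return 'average' in found and ('invoice' in found or 'amount' in found)
--     if r == 11:
--         return 'last' in found and ('days' in found or 'week' in found or 'month' in found)
--     return any(p in found for p in _RULE_KEYS[r])
--
--
-- def generate_sql_with_fallback(question: str) -> str:
--     """Generate SQL using pattern matching as fallback"""
--     q = question.lower()
--     # Stage 1: single scan of the text; at each position note every phrase starting there.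
--     found = set()
--     for i in range(len(q) + 1):
--         for p in _PHRASES:
--             if q.startswith(p, i):
--                 found.add(p)
--     # Stage 2: set logic only; lowest-numbered firing rule wins.
--     fired = [r for r in range(len(_SQL)) if _fires(r, found)]
--     if not fired:
--         return _DEFAULT
--     return _SQL[fired[0]]
-- ===== Notes on version B (the rewrite author's own statement) =====
-- stated objective: alternative
-- what changed: Instead of an if/elif chain doing a fresh substring search per keyword per branch, B makes one scan of the lowered question that collects every occurring keyword phrase into a set, then picks the lowest-numbered firing rule by pure set logic over that found-set.
import Mathlib
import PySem

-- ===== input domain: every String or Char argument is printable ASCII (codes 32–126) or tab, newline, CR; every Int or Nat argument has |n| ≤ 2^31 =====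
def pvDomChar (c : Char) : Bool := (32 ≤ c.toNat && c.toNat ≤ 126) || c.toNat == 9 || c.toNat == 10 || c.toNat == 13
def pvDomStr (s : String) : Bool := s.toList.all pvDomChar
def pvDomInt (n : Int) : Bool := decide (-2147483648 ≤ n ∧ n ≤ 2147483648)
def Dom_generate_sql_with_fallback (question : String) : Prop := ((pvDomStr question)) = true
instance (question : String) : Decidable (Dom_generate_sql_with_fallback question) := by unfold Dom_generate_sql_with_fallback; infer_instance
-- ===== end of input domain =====

-- B replaces A's per-branch substring searches by one scan of the text that collects every
-- occurring keyword phrase into a set, then pure set logic picks the lowest firing rule: alternative structure, same result.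

-- ===== PORT A =====
def generate_sql_with_fallback (question : String) : String :=
  let ql := PySem.Str.lower question
  if ["total revenue", "revenue", "total amount", "total sales", "sales total", "total spend", "spend total"].any (fun w => PySem.Str.isIn w ql) then "SELECT SUM(\"totalAmount\") as total_revenue FROM invoices;"
  else
  if ["count invoices", "number of invoices", "how many invoices"].any (fun w => PySem.Str.isIn w ql) then "SELECT COUNT(*) as invoice_count FROM invoices;"
  else
  if ["vendors", "suppliers", "top vendors"].any (fun w => PySem.Str.isIn w ql) then "SELECT name, COUNT(i.id) as invoice_count, SUM(i.\"totalAmount\") as total_amount FROM vendors v LEFT JOIN invoices i ON v.id = i.\"vendorId\" GROUP BY v.id, v.name ORDER BY total_amount DESC LIMIT 10;"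
  else
  if ["customers", "top customers"].any (fun w => PySem.Str.isIn w ql) then "SELECT name, COUNT(i.id) as invoice_count, SUM(i.\"totalAmount\") as total_amount FROM customers c LEFT JOIN invoices i ON c.id = i.\"customerId\" GROUP BY c.id, c.name ORDER BY total_amount DESC LIMIT 10;"
  else
  if ["paid invoices", "paid"].any (fun w => PySem.Str.isIn w ql) then "SELECT COUNT(*) as paid_count, SUM(\"totalAmount\") as paid_amount FROM invoices WHERE status = 'PAID';"
  else
  if ["pending invoices", "pending"].any (fun w => PySem.Str.isIn w ql) then "SELECT COUNT(*) as pending_count, SUM(\"totalAmount\") as pending_amount FROM invoices WHERE status = 'PENDING';"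
  else
  if ["overdue invoices", "overdue"].any (fun w => PySem.Str.isIn w ql) then "SELECT COUNT(*) as overdue_count, SUM(\"totalAmount\") as overdue_amount FROM invoices WHERE status = 'OVERDUE';"
  else
  if ["jan", "january", "month"].any (fun w => PySem.Str.isIn w ql) then "SELECT EXTRACT(MONTH FROM \"issueDate\") as month, COUNT(*) as invoice_count, SUM(\"totalAmount\") as total_amount FROM invoices WHERE EXTRACT(MONTH FROM \"issueDate\") = 1 GROUP BY EXTRACT(MONTH FROM \"issueDate\");"
  else
  if ["sales by month", "monthly sales", "revenue by month"].any (fun w => PySem.Str.isIn w ql) then "SELECT EXTRACT(MONTH FROM \"issueDate\") as month, COUNT(*) as invoice_count, SUM(\"totalAmount\") as total_amount FROM invoices GROUP BY EXTRACT(MONTH FROM \"issueDate\") ORDER BY month;"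
  else
  if (PySem.Str.isIn "average" ql && (PySem.Str.isIn "invoice" ql || PySem.Str.isIn "amount" ql)) then "SELECT AVG(\"totalAmount\") as average_invoice_value FROM invoices;"
  else
  if ["highest invoice", "largest invoice", "biggest invoice"].any (fun w => PySem.Str.isIn w ql) then "SELECT v.name as vendor, \"invoiceNumber\", \"totalAmount\" FROM invoices i JOIN vendors v ON i.\"vendorId\" = v.id ORDER BY \"totalAmount\" DESC LIMIT 1;"
  else
  if (PySem.Str.isIn "last" ql && (PySem.Str.isIn "days" ql || PySem.Str.isIn "week" ql || PySem.Str.isIn "month" ql)) then "SELECT COUNT(*) as recent_invoices, SUM(\"totalAmount\") as recent_total FROM invoices WHERE \"issueDate\" >= CURRENT_DATE - INTERVAL '30 days';"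
  else
  "SELECT 'Sorry, I cannot understand this question. Try asking about total revenue, invoices, vendors, customers, monthly sales, or average invoice value.' as message;"

-- ===== PORT B =====
def pvDefault : String := "SELECT 'Sorry, I cannot understand this question. Try asking about total revenue, invoices, vendors, customers, monthly sales, or average invoice value.' as message;"

def pvSQL : List String := [
  "SELECT SUM(\"totalAmount\") as total_revenue FROM invoices;",
  "SELECT COUNT(*) as invoice_count FROM invoices;",
  "SELECT name, COUNT(i.id) as invoice_count, SUM(i.\"totalAmount\") as total_amount FROM vendors v LEFT JOIN invoices i ON v.id = i.\"vendorId\" GROUP BY v.id, v.name ORDER BY total_amount DESC LIMIT 10;",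
  "SELECT name, COUNT(i.id) as invoice_count, SUM(i.\"totalAmount\") as total_amount FROM customers c LEFT JOIN invoices i ON c.id = i.\"customerId\" GROUP BY c.id, c.name ORDER BY total_amount DESC LIMIT 10;",
  "SELECT COUNT(*) as paid_count, SUM(\"totalAmount\") as paid_amount FROM invoices WHERE status = 'PAID';",
  "SELECT COUNT(*) as pending_count, SUM(\"totalAmount\") as pending_amount FROM invoices WHERE status = 'PENDING';",
  "SELECT COUNT(*) as overdue_count, SUM(\"totalAmount\") as overdue_amount FROM invoices WHERE status = 'OVERDUE';",
  "SELECT EXTRACT(MONTH FROM \"issueDate\") as month, COUNT(*) as invoice_count, SUM(\"totalAmount\") as total_amount FROM invoices WHERE EXTRACT(MONTH FROM \"issueDate\") = 1 GROUP BY EXTRACT(MONTH FROM \"issueDate\");",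
  "SELECT EXTRACT(MONTH FROM \"issueDate\") as month, COUNT(*) as invoice_count, SUM(\"totalAmount\") as total_amount FROM invoices GROUP BY EXTRACT(MONTH FROM \"issueDate\") ORDER BY month;",
  "SELECT AVG(\"totalAmount\") as average_invoice_value FROM invoices;",
  "SELECT v.name as vendor, \"invoiceNumber\", \"totalAmount\" FROM invoices i JOIN vendors v ON i.\"vendorId\" = v.id ORDER BY \"totalAmount\" DESC LIMIT 1;",
  "SELECT COUNT(*) as recent_invoices, SUM(\"totalAmount\") as recent_total FROM invoices WHERE \"issueDate\" >= CURRENT_DATE - INTERVAL '30 days';"]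

def pvRuleKeys : List (List String) := [
  ["total revenue", "revenue", "total amount", "total sales", "sales total", "total spend", "spend total"],
  ["count invoices", "number of invoices", "how many invoices"],
  ["vendors", "suppliers", "top vendors"],
  ["customers", "top customers"],
  ["paid invoices", "paid"],
  ["pending invoices", "pending"],
  ["overdue invoices", "overdue"],
  ["jan", "january", "month"],
  ["sales by month", "monthly sales", "revenue by month"],
  [],
  ["highest invoice", "largest invoice", "biggest invoice"],
  []]

-- Source B's _PHRASES (the sorted set of all phrases stage 1 looks for), as the literal list Python builds
def pvPhrases : List String :=
  ["amount", "average", "biggest invoice", "count invoices", "customers", "days",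
   "highest invoice", "how many invoices", "invoice", "jan", "january", "largest invoice",
   "last", "month", "monthly sales", "number of invoices", "overdue", "overdue invoices",
   "paid", "paid invoices", "pending", "pending invoices", "revenue", "revenue by month",
   "sales by month", "sales total", "spend total", "suppliers", "top customers",
   "top vendors", "total amount", "total revenue", "total sales", "total spend",
   "vendors", "week"]

-- q.startswith(p, i): exact for 0 ≤ i (the only i the loop produces), as p <+: q[i:]
def pvStartsAt (q : List Char) (p : String) (i : Int) : Bool :=
  PySem.Chars.startswith (q.drop i.toNat) p.toList

-- Stage 1 of Source B: the single scan building the found-set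
def pvScan (q : List Char) : PySem.Set String :=
  (PySem.List.pyRange 0 ((q.length : Int) + 1) 1).foldl
    (fun found i =>
      pvPhrases.foldl (fun f p => if pvStartsAt q p i then PySem.Set.add f p else f) found)
    PySem.Set.empty

-- Source B's _fires(r, found)
def pvFires (r : Int) (found : PySem.Set String) : Bool :=
  if r == 9 then
    PySem.Set.contains found "average" && (PySem.Set.contains found "invoice" || PySem.Set.contains found "amount")
  else if r == 11 then
    PySem.Set.contains found "last" && (PySem.Set.contains found "days" || PySem.Set.contains found "week" || PySem.Set.contains found "month")
  else
    (PySem.List.pyGetD pvRuleKeys r []).any (fun p => PySem.Set.contains found p)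

-- 'if not fired: return _DEFAULT / return _SQL[fired[0]]' of Source B (index always in range)
def pvPick (fired : List Int) : String :=
  match fired with
  | [] => pvDefault
  | r :: _ => PySem.List.pyGetD pvSQL r ""

def generate_sql_with_fallback_alt (question : String) : String :=
  let q := (PySem.Str.lower question).toList
  let found := pvScan q
  let fired := (PySem.List.pyRange 0 (pvSQL.length : Int) 1).filter (fun r => pvFires r found)
  pvPick fired

-- ===== PRECONDITION & SPEC =====
def Spec_generate_sql_with_fallback (question : String) (out : String) : Prop := out = generate_sql_with_fallback_alt question
instance (question : String) (out : String) : Decidable (Spec_generate_sql_with_fallback question out) := by unfold Spec_generate_sql_with_fallback; infer_instance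

-- ===== CLAIM (what is proved, stated in full; the proofs are below) =====
def Claim_equal_generate_sql_with_fallback : Prop := ∀ (question : String), Dom_generate_sql_with_fallback question → Spec_generate_sql_with_fallback question (generate_sql_with_fallback question)

-- ===== LEMMAS AND PROOFS =====

-- membership in the inner fold (over the phrase list) of stage 1
theorem pv_mem_inner (ps : List String) (q : List Char) (i : Int) (found : PySem.Set String) (x : String) :
    x ∈ ps.foldl (fun f p => if pvStartsAt q p i then PySem.Set.add f p else f) found ↔
      x ∈ found ∨ (x ∈ ps ∧ pvStartsAt q x i = true) := by
  induction ps generalizing found with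
  | nil => simp
  | cons p t ih =>
    simp only [List.foldl_cons]
    by_cases h : pvStartsAt q p i = true
    · rw [if_pos h, ih]
      simp only [PySem.Set.mem_add, List.mem_cons]
      constructor
      · rintro (⟨hf | rfl⟩ | ⟨hm, hs⟩)
        exacts [Or.inl hf, Or.inr ⟨Or.inl rfl, h⟩, Or.inr ⟨Or.inr hm, hs⟩]
      · rintro (hf | ⟨rfl | hm, hs⟩)
        exacts [Or.inl (Or.inl hf), Or.inl (Or.inr rfl), Or.inr ⟨hm, hs⟩]
    · rw [if_neg h, ih]
      simp only [List.mem_cons]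
      constructor
      · rintro (hf | ⟨hm, hs⟩)
        exacts [Or.inl hf, Or.inr ⟨Or.inr hm, hs⟩]
      · rintro (hf | ⟨rfl | hm, hs⟩)
        exacts [Or.inl hf, absurd hs h, Or.inr ⟨hm, hs⟩]

-- membership in the outer fold (over any list of positions)
theorem pv_mem_outer (is : List Int) (q : List Char) (found : PySem.Set String) (x : String) :
    x ∈ is.foldl
        (fun found i => pvPhrases.foldl (fun f p => if pvStartsAt q p i then PySem.Set.add f p else f) found)
        found ↔
      x ∈ found ∨ (x ∈ pvPhrases ∧ ∃ i ∈ is, pvStartsAt q x i = true) := by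
  induction is generalizing found with
  | nil => simp
  | cons i t ih =>
    simp only [List.foldl_cons, ih, pv_mem_inner, List.mem_cons]
    constructor
    · rintro ((hf | ⟨hm, hs⟩) | ⟨hm, j, hj, hs⟩)
      exacts [Or.inl hf, Or.inr ⟨hm, i, Or.inl rfl, hs⟩, Or.inr ⟨hm, j, Or.inr hj, hs⟩]
    · rintro (hf | ⟨hm, j, rfl | hj, hs⟩)
      exacts [Or.inl (Or.inl hf), Or.inl (Or.inr ⟨hm, hs⟩), Or.inr ⟨hm, j, hj, hs⟩]

-- the found-set of stage 1 holds exactly the listed phrases occurring in q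
theorem pv_mem_scan (q : List Char) (x : String) :
    x ∈ pvScan q ↔ x ∈ pvPhrases ∧ PySem.Chars.isIn x.toList q = true := by
  unfold pvScan
  rw [pv_mem_outer]
  simp only [PySem.Set.empty, List.not_mem_nil, false_or]
  constructor
  · rintro ⟨hm, i, _, hs⟩
    refine ⟨hm, (PySem.Chars.exists_prefix_drop_iff_isIn _ _).mp
      ⟨i.toNat, (PySem.Chars.startswith_iff _ _).mp hs⟩⟩
  · rintro ⟨hm, hin⟩
    refine ⟨hm, ?_⟩
    obtain ⟨j, hj⟩ := (PySem.Chars.exists_prefix_drop_iff_isIn _ _).mpr hin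
    by_cases hle : (j : Int) ≤ (q.length : Int)
    · refine ⟨(j : Int), PySem.List.mem_pyRange_one.mpr ⟨Int.natCast_nonneg j, by omega⟩, ?_⟩
      unfold pvStartsAt
      rw [Int.toNat_natCast]
      exact (PySem.Chars.startswith_iff _ _).mpr hj
    · -- j past the end: the prefix forces x = "", found again at position q.length
      have hdrop : q.drop j = [] := List.drop_eq_nil_of_le (by omega)
      have hx : x.toList = [] := List.prefix_nil.mp (hdrop ▸ hj)
      refine ⟨(q.length : Int), PySem.List.mem_pyRange_one.mpr ⟨Int.natCast_nonneg _, by omega⟩, ?_⟩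
      unfold pvStartsAt
      rw [Int.toNat_natCast, hx]
      exact (PySem.Chars.startswith_iff _ _).mpr (List.nil_prefix)

-- Bool form usable by simp, with the (decidable) phrase-list membership explicit
theorem pv_contains_scan (q : List Char) (x : String) :
    PySem.Set.contains (pvScan q) x = (pvPhrases.contains x && PySem.Chars.isIn x.toList q) := by
  rw [Bool.eq_iff_iff, PySem.Set.contains_iff, Bool.and_eq_true, pv_mem_scan]
  constructor
  · rintro ⟨hm, h⟩
    exact ⟨by simpa using hm, h⟩
  · rintro ⟨hm, h⟩
    exact ⟨by simpa using hm, h⟩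

-- first hit of the filtered rule list = the ordered if-chain
theorem pv_pick_filter_eq_foldr (f : Int → Bool) (l : List Int) :
    pvPick (l.filter f) = l.foldr (fun r acc => if f r then PySem.List.pyGetD pvSQL r "" else acc) pvDefault := by
  induction l with
  | nil => rfl
  | cons a t ih =>
    rw [List.filter_cons]
    cases h : f a
    · simpa only [h, Bool.false_eq_true, if_false, List.foldr_cons] using ih
    · simp only [h, if_true, List.foldr_cons]
      rfl

set_option maxHeartbeats 4000000 in
theorem pv_equal (question : String) :
    generate_sql_with_fallback question = generate_sql_with_fallback_alt question := by
  unfold generate_sql_with_fallback_alt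
  rw [pv_pick_filter_eq_foldr]
  have hr : PySem.List.pyRange 0 ((pvSQL.length : Int)) 1 = [0,1,2,3,4,5,6,7,8,9,10,11] := by decide
  rw [hr]
  have f0 : ∀ found, pvFires 0 found = ["total revenue", "revenue", "total amount", "total sales", "sales total", "total spend", "spend total"].any (fun p => PySem.Set.contains found p) := fun _ => rfl
  have f1 : ∀ found, pvFires 1 found = ["count invoices", "number of invoices", "how many invoices"].any (fun p => PySem.Set.contains found p) := fun _ => rfl
  have f2 : ∀ found, pvFires 2 found = ["vendors", "suppliers", "top vendors"].any (fun p => PySem.Set.contains found p) := fun _ => rfl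
  have f3 : ∀ found, pvFires 3 found = ["customers", "top customers"].any (fun p => PySem.Set.contains found p) := fun _ => rfl
  have f4 : ∀ found, pvFires 4 found = ["paid invoices", "paid"].any (fun p => PySem.Set.contains found p) := fun _ => rfl
  have f5 : ∀ found, pvFires 5 found = ["pending invoices", "pending"].any (fun p => PySem.Set.contains found p) := fun _ => rfl
  have f6 : ∀ found, pvFires 6 found = ["overdue invoices", "overdue"].any (fun p => PySem.Set.contains found p) := fun _ => rfl
  have f7 : ∀ found, pvFires 7 found = ["jan", "january", "month"].any (fun p => PySem.Set.contains found p) := fun _ => rfl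
  have f8 : ∀ found, pvFires 8 found = ["sales by month", "monthly sales", "revenue by month"].any (fun p => PySem.Set.contains found p) := fun _ => rfl
  have f9 : ∀ found, pvFires 9 found = (PySem.Set.contains found "average" && (PySem.Set.contains found "invoice" || PySem.Set.contains found "amount")) := fun _ => rfl
  have f10 : ∀ found, pvFires 10 found = ["highest invoice", "largest invoice", "biggest invoice"].any (fun p => PySem.Set.contains found p) := fun _ => rfl
  have f11 : ∀ found, pvFires 11 found = (PySem.Set.contains found "last" && (PySem.Set.contains found "days" || PySem.Set.contains found "week" || PySem.Set.contains found "month")) := fun _ => rfl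
  simp only [List.foldr_cons, List.foldr_nil, f0, f1, f2, f3, f4, f5, f6, f7, f8, f9, f10, f11,
    pv_contains_scan, pvPhrases, List.contains_cons, List.contains_nil, String.reduceBEq,
    Bool.or_false, Bool.true_and,
    List.any_cons, List.any_nil, generate_sql_with_fallback,
    PySem.Str.isIn_eq, PySem.Str.toList_lower]
  rfl

-- ===== VERDICT (by name: the statement is the Claim_ definition above) =====
theorem generate_sql_with_fallback_spec : Claim_equal_generate_sql_with_fallback := by
  intro q _
  unfold Spec_generate_sql_with_fallback
  exact pv_equal q
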